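-- pv_equiv track=rewrite | github.com/atorulia/codewars-python | Conways_Game_of_Life_Unlimited_Edition.py | set_to_table
-- ===== SOURCE A (Python) =====
-- def set_to_table(s):
--     if not set:
--         mi = mj = ni = nj = 0
--     else:
--         mi = min(map(lambda x: x[0], s))
--         mj = min(map(lambda x: x[1], s))
--         ni = max(map(lambda x: x[0], s))
--         nj = max(map(lambda x: x[1], s))
--
--     table = [[0 for _ in range(nj - mj + 1)] for _ in range(ni - mi + 1)]
--
--     for (i, j) in s:
--         table[i - mi][j - mj] = 1
--
--     return table
-- ===== SOURCE B (Python) =====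
-- def set_to_table(s):
--     cells = list(s)
--     (mi, mj) = (ni, nj) = cells[0]
--     for (i, j) in cells[1:]:
--         mi = min(mi, i)
--         mj = min(mj, j)
--         ni = max(ni, i)
--         nj = max(nj, j)
--     return [[1 if (i, j) in s else 0 for j in range(mj, nj + 1)]
--             for i in range(mi, ni + 1)]
-- ===== Notes on version B (the rewrite author's own statement) =====
-- stated objective: alternative
-- what changed: B computes the four bounds in one accumulator pass over the cells (instead of A's four separate min/max passes) and builds the grid by a nested membership comprehension over the bounding box (instead of A's preallocated zero grid mutated cell-by-cell).
import Mathlib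
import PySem

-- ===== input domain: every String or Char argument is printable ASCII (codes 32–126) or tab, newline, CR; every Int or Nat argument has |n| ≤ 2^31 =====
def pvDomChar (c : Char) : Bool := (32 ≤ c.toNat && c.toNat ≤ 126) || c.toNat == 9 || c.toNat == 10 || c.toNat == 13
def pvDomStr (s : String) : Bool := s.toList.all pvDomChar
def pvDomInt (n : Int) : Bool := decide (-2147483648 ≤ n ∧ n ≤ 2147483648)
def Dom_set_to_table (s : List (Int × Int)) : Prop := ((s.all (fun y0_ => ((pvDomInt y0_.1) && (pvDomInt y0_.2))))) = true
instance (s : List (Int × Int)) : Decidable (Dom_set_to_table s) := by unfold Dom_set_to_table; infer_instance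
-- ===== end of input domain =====

-- B computes the bounds in a single accumulator pass and builds the grid by a nested
-- membership comprehension, instead of A's four min/max passes plus a preallocated zero
-- grid mutated cell-by-cell (objective: alternative).

-- ===== PORT A =====
-- `if not set:` in A tests the truthy builtin `set`, so the else branch always runs.
-- Python min/max raise ValueError on empty s: excluded by Pre_; `.getD 0` is the total form.
def set_to_table (s : List (Int × Int)) : List (List Int) :=
  let mi := ((PySem.List.min? (s.map (fun x => x.1)) (fun y => y)).getD 0)
  let mj := ((PySem.List.min? (s.map (fun x => x.2)) (fun y => y)).getD 0)
  let ni := ((PySem.List.max? (s.map (fun x => x.1)) (fun y => y)).getD 0)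
  let nj := ((PySem.List.max? (s.map (fun x => x.2)) (fun y => y)).getD 0)
  let table : List (List Int) :=
    (PySem.List.pyRange 0 (ni - mi + 1) 1).map (fun _ =>
      (PySem.List.pyRange 0 (nj - mj + 1) 1).map (fun _ => (0 : Int)))
  s.foldl (fun table p =>
    PySem.List.pySetD table (p.1 - mi)
      (PySem.List.pySetD (PySem.List.pyGetD table (p.1 - mi) []) (p.2 - mj) 1)) table

-- ===== PORT B =====
-- the loop body: fold all four running bounds in one accumulator (mi, mj, ni, nj)
def pvBounds (acc : Int × Int × Int × Int) (p : Int × Int) : Int × Int × Int × Int :=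
  (min acc.1 p.1, min acc.2.1 p.2, max acc.2.2.1 p.1, max acc.2.2.2 p.2)

-- `cells[0]` raises IndexError on empty s in Python B (outside Pre_); [] is the total form.
def set_to_table_alt (s : List (Int × Int)) : List (List Int) :=
  match s with
  | [] => []
  | p :: rest =>
    let b := rest.foldl pvBounds (p.1, p.2, p.1, p.2)
    (PySem.List.pyRange b.1 (b.2.2.1 + 1) 1).map (fun i =>
      (PySem.List.pyRange b.2.1 (b.2.2.2 + 1) 1).map (fun j =>
        if (i, j) ∈ s then (1 : Int) else 0))

-- ===== PRECONDITION & SPEC =====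
-- Python's min() on an empty sequence raises ValueError, so A raises on s = []: excluded.
def Pre_set_to_table (s : List (Int × Int)) : Prop := s ≠ []
instance (s : List (Int × Int)) : Decidable (Pre_set_to_table s) := by unfold Pre_set_to_table; infer_instance
def pvWitness_set_to_table : (List (Int × Int)) := [(1, 2), (3, 4), (2, 2)]

def Spec_set_to_table (s : List (Int × Int)) (out : List (List Int)) : Prop := out = set_to_table_alt s
instance (s : List (Int × Int)) (out : List (List Int)) : Decidable (Spec_set_to_table s out) := by unfold Spec_set_to_table; infer_instance

-- ===== CLAIM (what is proved, stated in full; the proofs are below) =====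
def Claim_equal_set_to_table : Prop := ∀ (s : List (Int × Int)), Dom_set_to_table s → Pre_set_to_table s → Spec_set_to_table s (set_to_table s)

-- ===== LEMMAS AND PROOFS =====

-- B's one-pass fold computes the four componentwise running extrema
theorem pvBounds_fold (l : List (Int × Int)) : ∀ (a b c d : Int),
    l.foldl pvBounds (a, b, c, d)
      = ((l.map (fun x => x.1)).foldl min a, (l.map (fun x => x.2)).foldl min b,
         (l.map (fun x => x.1)).foldl max c, (l.map (fun x => x.2)).foldl max d) := by
  induction l with
  | nil => intro a b c d; simp
  | cons p t ih => intro a b c d; simpa [pvBounds] using ih _ _ _ _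

-- A's loop body 'table[i - mi][j - mj] = 1', as a named function so the fold lemma can speak about it
def pvStep (mi mj : Int) (table : List (List Int)) (p : Int × Int) : List (List Int) :=
  PySem.List.pySetD table (p.1 - mi)
    (PySem.List.pySetD (PySem.List.pyGetD table (p.1 - mi) []) (p.2 - mj) 1)

-- one in-range write is a List.set of a List.set
theorem pvStep_eq_set (mi mj : Int) (t : List (List Int)) (p : Int × Int)
    (h1 : 0 ≤ p.1 - mi) (h2 : (p.1 - mi).toNat < t.length) (h3 : 0 ≤ p.2 - mj) :
    pvStep mi mj t p
      = t.set (p.1 - mi).toNat ((t[(p.1 - mi).toNat]'h2).set (p.2 - mj).toNat 1) := by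
  unfold pvStep
  rw [PySem.List.pySetD_of_nonneg _ _ h1,
      PySem.List.pyGetD_eq_getElem _ _ h1 (by omega),
      PySem.List.pySetD_of_nonneg _ _ h3]

-- a rectangular table equals its tabulation by indices
theorem pv_retab (t : List (List Int)) (W : Nat) (ht : ∀ row ∈ t, row.length = W) :
    t = (List.range t.length).map (fun r =>
      (List.range W).map (fun c => (t.getD r []).getD c 0)) := by
  apply List.ext_getElem
  · simp
  · intro r h1 h2
    simp only [List.getElem_map, List.getElem_range]
    apply List.ext_getElem
    · simp [ht t[r] (by exact List.getElem_mem h1)]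
    · intro c hc1 hc2
      simp [List.getD, List.getElem?_eq_getElem h1, List.getElem?_eq_getElem hc1]

-- an all-zero table reads 0 at every index (in or out of range)
theorem pv_getD_zero (t : List (List Int)) (h : ∀ row ∈ t, ∀ x ∈ row, x = 0) (r c : Nat) :
    ((t.getD r []).getD c 0) = 0 := by
  by_cases hr : r < t.length
  · rw [List.getD_eq_getElem _ _ hr]
    by_cases hc : c < t[r].length
    · rw [List.getD_eq_getElem _ _ hc]
      exact h _ (List.getElem_mem hr) _ (List.getElem_mem hc)
    · rw [List.getD_eq_default _ _ (Nat.le_of_not_lt hc)]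
  · rw [List.getD_eq_default _ _ (Nat.le_of_not_lt hr)]
    simp

-- after marking every cell of l into a rectangular table, entry (r,c) is 1 where (mi+r, mj+c) ∈ l
theorem pv_fold_mark (mi mj : Int) (W : Nat) :
    ∀ (l : List (Int × Int)) (t : List (List Int)),
    (∀ row ∈ t, row.length = W) →
    (∀ p ∈ l, 0 ≤ p.1 - mi ∧ (p.1 - mi).toNat < t.length ∧ 0 ≤ p.2 - mj ∧ (p.2 - mj).toNat < W) →
    l.foldl (pvStep mi mj) t = (List.range t.length).map (fun (r : Nat) =>
      (List.range W).map (fun (c : Nat) =>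
        if (mi + (r : Int), mj + (c : Int)) ∈ l then 1 else (t.getD r []).getD c 0)) := by
  intro l
  induction l with
  | nil => intro t ht _; simpa using pv_retab t W ht
  | cons p l ih =>
    intro t ht hb
    obtain ⟨h1, h2, h3, h4⟩ := hb p (by simp)
    have hstep := pvStep_eq_set mi mj t p h1 h2 h3
    have hlen : (pvStep mi mj t p).length = t.length := by rw [hstep]; simp
    rw [List.foldl_cons, ih (pvStep mi mj t p)
      (by
        intro row hrow
        rw [hstep] at hrow
        rcases List.mem_or_eq_of_mem_set hrow with h | h
        · exact ht row h
        · subst h; simp [ht _ (List.getElem_mem h2)])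
      (by intro q hq; have := hb q (by simp [hq]); omega)]
    rw [hlen]
    apply List.ext_getElem
    · simp
    · intro r hr1 hr2
      simp only [List.getElem_map, List.getElem_range] at *
      apply List.ext_getElem
      · simp
      · intro c hc1 hc2
        simp only [List.getElem_map, List.getElem_range] at *
        have hrN : r < t.length := by simpa using hr1
        have hcW : c < W := by simpa using hc1
        by_cases hmem : (mi + (r : Int), mj + (c : Int)) ∈ l
        · simp [hmem]
        · by_cases hp : p = (mi + (r : Int), mj + (c : Int))
          · have hp1 : p.1 = mi + (r : Int) := by rw [hp]
            have hp2 : p.2 = mj + (c : Int) := by rw [hp]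
            have hr : (p.1 - mi).toNat = r := by omega
            have hc : (p.2 - mj).toNat = c := by omega
            subst hr; subst hc
            rw [if_neg hmem, if_pos (List.mem_cons.mpr (Or.inl hp.symm))]
            rw [hstep]
            have hrowlen : (p.2 - mj).toNat < (t[(p.1 - mi).toNat]'h2).length := by
              rw [ht _ (List.getElem_mem h2)]; exact hcW
            simp [List.getD, h2, hrowlen]
          · have hne : ¬ (mi + (r:Int), mj + (c:Int)) ∈ p :: l := by
              simp only [List.mem_cons]
              rintro (h | h)
              · exact hp h.symm
              · exact hmem h
            rw [if_neg hmem, if_neg hne, hstep]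
            have hnot : ¬ ((p.1 - mi).toNat = r ∧ (p.2 - mj).toNat = c) := by
              rintro ⟨ha, hbb⟩
              exact hp (by ext <;> simp <;> omega)
            by_cases ha : (p.1 - mi).toNat = r
            · have hbb : (p.2 - mj).toNat ≠ c := fun h => hnot ⟨ha, h⟩
              subst ha
              simp [List.getD, hbb, hrN,
                (show c < (t[(p.1 - mi).toNat]'hrN).length by
                  rw [ht _ (List.getElem_mem hrN)]; exact hcW)]
            · simp [List.getD, ha]

-- ===== VERDICT (by name: the statement is the Claim_ definition above) =====
theorem set_to_table_spec : Claim_equal_set_to_table := by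
  intro s _ hpre
  unfold Spec_set_to_table
  obtain ⟨p, rest, rfl⟩ := List.exists_cons_of_ne_nil hpre
  -- the four min/max passes of A, rewritten as running folds via min?_id_cons / max?_id_cons
  have hmi : PySem.List.min? (((p :: rest)).map (fun x => x.1)) (fun y => y)
      = some ((rest.map (fun x => x.1)).foldl min p.1) := by
    rw [List.map_cons, PySem.List.min?_id_cons]
  have hmj : PySem.List.min? (((p :: rest)).map (fun x => x.2)) (fun y => y)
      = some ((rest.map (fun x => x.2)).foldl min p.2) := by
    rw [List.map_cons, PySem.List.min?_id_cons]
  have hni : PySem.List.max? (((p :: rest)).map (fun x => x.1)) (fun y => y)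
      = some ((rest.map (fun x => x.1)).foldl max p.1) := by
    rw [List.map_cons, PySem.List.max?_id_cons]
  have hnj : PySem.List.max? (((p :: rest)).map (fun x => x.2)) (fun y => y)
      = some ((rest.map (fun x => x.2)).foldl max p.2) := by
    rw [List.map_cons, PySem.List.max?_id_cons]
  set mi := (rest.map (fun x => x.1)).foldl min p.1 with hmi'
  set mj := (rest.map (fun x => x.2)).foldl min p.2 with hmj'
  set ni := (rest.map (fun x => x.1)).foldl max p.1 with hni'
  set nj := (rest.map (fun x => x.2)).foldl max p.2 with hnj'
  -- bounds: every coordinate lies inside [mi,ni] × [mj,nj]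
  have hb : ∀ q ∈ (p :: rest), mi ≤ q.1 ∧ q.1 ≤ ni ∧ mj ≤ q.2 ∧ q.2 ≤ nj := by
    intro q hq
    exact ⟨PySem.List.min?_isMin hmi q.1 (List.mem_map_of_mem hq),
           PySem.List.max?_isMax hni q.1 (List.mem_map_of_mem hq),
           PySem.List.min?_isMin hmj q.2 (List.mem_map_of_mem hq),
           PySem.List.max?_isMax hnj q.2 (List.mem_map_of_mem hq)⟩
  show set_to_table (p :: rest) = set_to_table_alt (p :: rest)
  rw [show set_to_table_alt (p :: rest)
      = (let b := rest.foldl pvBounds (p.1, p.2, p.1, p.2)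
         (PySem.List.pyRange b.1 (b.2.2.1 + 1) 1).map (fun i =>
           (PySem.List.pyRange b.2.1 (b.2.2.2 + 1) 1).map (fun j =>
             if (i, j) ∈ (p :: rest) then (1 : Int) else 0))) from rfl]
  unfold set_to_table
  rw [pvBounds_fold]
  simp only [hmi, hmj, hni, hnj, Option.getD_some]
  rw [show (fun (table : List (List Int)) (q : Int × Int) =>
      PySem.List.pySetD table (q.1 - mi)
        (PySem.List.pySetD (PySem.List.pyGetD table (q.1 - mi) []) (q.2 - mj) 1))
      = pvStep mi mj from rfl]
  rw [pv_fold_mark mi mj (nj - mj + 1).toNat (p :: rest) _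
    (by
      intro row hrow
      simp only [List.mem_map] at hrow
      obtain ⟨_, _, h⟩ := hrow
      simp [← h, PySem.List.length_pyRange_one])
    (by
      intro q hq
      obtain ⟨hb1, hb2, hb3, hb4⟩ := hb q hq
      simp only [List.length_map, PySem.List.length_pyRange_one]
      omega)]
  simp only [List.length_map, PySem.List.pyRange_one, List.map_map]
  apply List.ext_getElem
  · simp; omega
  · intro r hr1 hr2
    simp only [List.getElem_map, List.getElem_range] at *
    apply List.ext_getElem
    · simp; omega
    · intro c hc1 hc2
      simp only [List.getElem_map, List.getElem_range, List.length_range, Function.comp] at *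
      rw [pv_getD_zero _ (by
        intro row hrow x hx
        simp only [List.mem_map] at hrow
        obtain ⟨_, _, hrow⟩ := hrow
        rw [← hrow] at hx
        simp only [List.mem_map, Function.comp] at hx
        obtain ⟨_, _, hx⟩ := hx
        exact hx.symm) r c]
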